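-- pv_equiv track=rewrite | github.com/FranckyB/ComfyUI-Prompt-Manager | nodes/prompt_manager_advanced.py | sort_prompts_data
-- ===== SOURCE A (Python) =====
-- def sort_prompts_data(data):
--     """Sort categories and prompts alphabetically (case-insensitive), preserving __meta__"""
--     sorted_data = {}
--     for category in sorted(data.keys(), key=str.lower):
--         cat_data = data[category]
--         # Preserve __meta__ key (not a prompt), sort the rest
--         meta = cat_data.get("__meta__")
--         sorted_prompts = dict(sorted(
--             ((k, v) for k, v in cat_data.items() if k != "__meta__"),
--             key=lambda item: item[0].lower()
--         ))
--         if meta is not None: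
--             sorted_prompts["__meta__"] = meta
--         sorted_data[category] = sorted_prompts
--     return sorted_data
-- ===== SOURCE B (Python) =====
-- def sort_prompts_data(data):
--     """Sort categories and prompts alphabetically (case-insensitive), preserving __meta__"""
--
--     def msort(items, key):
--         # hand-written top-down stable merge sort (iterative merge)
--         if len(items) <= 1:
--             return items
--         mid = len(items) // 2
--         left = msort(items[:mid], key)
--         right = msort(items[mid:], key)
--         out = []
--         i = j = 0
--         while i < len(left) and j < len(right):
--             if key(left[i]) <= key(right[j]):
--                 out.append(left[i])
--                 i += 1
--             else:
--                 out.append(right[j])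
--                 j += 1
--         return out + left[i:] + right[j:]
--
--     def sort_category(cat_data):
--         prompts = dict(msort([kv for kv in cat_data.items() if kv[0] != "__meta__"],
--                              key=lambda kv: kv[0].lower()))
--         meta = cat_data.get("__meta__")
--         if meta is not None:
--             prompts["__meta__"] = meta
--         return prompts
--
--     return {category: sort_category(data[category])
--             for category in msort(list(data), key=str.lower)}
-- ===== Notes on version B (the rewrite author's own statement) =====
-- stated objective: alternative
-- what changed: Replaces both calls to Python's builtin Timsort with a hand-written top-down stable merge sort (recursive halving, iterative two-pointer merge), and builds the result as a dict comprehension over the merge-sorted category names instead of A's imperative insertion loop.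
import Mathlib
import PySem

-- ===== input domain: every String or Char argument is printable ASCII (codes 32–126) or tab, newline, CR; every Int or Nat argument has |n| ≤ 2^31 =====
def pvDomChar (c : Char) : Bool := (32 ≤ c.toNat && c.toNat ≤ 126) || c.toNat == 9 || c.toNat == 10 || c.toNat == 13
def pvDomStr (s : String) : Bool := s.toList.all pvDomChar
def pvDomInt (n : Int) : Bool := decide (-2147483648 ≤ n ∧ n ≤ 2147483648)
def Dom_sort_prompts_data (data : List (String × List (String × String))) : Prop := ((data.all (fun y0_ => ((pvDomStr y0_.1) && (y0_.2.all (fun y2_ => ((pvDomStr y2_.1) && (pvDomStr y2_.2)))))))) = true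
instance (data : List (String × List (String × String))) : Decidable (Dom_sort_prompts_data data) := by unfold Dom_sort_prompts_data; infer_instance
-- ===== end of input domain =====

-- B replaces both builtin sorted() calls by a hand-written top-down stable merge sort and builds
-- the result as a dict comprehension over the merge-sorted category names (objective: alternative).

-- ===== PORT A =====
def sort_prompts_data (data : List (String × List (String × String))) : List (String × List (String × String)) :=
  (PySem.List.sorted ((PySem.Dict.mk data).keys) (fun k => PySem.Str.lower k) false).foldl
    (fun sorted_data category =>
      let cat_data := (PySem.Dict.mk data).getD category []
      let metaV := PySem.Dict.get? (PySem.Dict.mk cat_data) "__meta__"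
      let sorted_prompts := PySem.Dict.ofList
        (PySem.List.sorted (cat_data.filter (fun kv => kv.1 != "__meta__"))
          (fun kv => PySem.Str.lower kv.1) false)
      let sorted_prompts' :=
        match metaV with
        | some m => sorted_prompts.insert "__meta__" m
        | none => sorted_prompts
      sorted_data.insert category sorted_prompts'.items)
    PySem.Dict.empty |>.items

-- ===== PORT B =====
-- the two-pointer merge 'while' loop of Source B's msort (i, j, out are the loop state;
-- L[i]/R[j] are read under the loop guard i < len(L) ∧ j < len(R), so plain getElem is exact)
def pvMergeLoop {α κ : Type} [LinearOrder κ] (key : α → κ) (L R : List α) (i j : Nat) (out : List α) : List α :=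
  if h : i < L.length ∧ j < R.length then
    if key (L[i]'h.1) ≤ key (R[j]'h.2) then
      pvMergeLoop key L R (i + 1) j (out ++ [L[i]'h.1])
    else
      pvMergeLoop key L R i (j + 1) (out ++ [R[j]'h.2])
  else
    -- return out + left[i:] + right[j:]  (slices with 0 ≤ i, j are drops)
    out ++ L.drop i ++ R.drop j
termination_by (L.length - i) + (R.length - j)
decreasing_by all_goals omega

-- Source B's msort: top-down merge sort; items[:mid] / items[mid:] with mid = len // 2 ≥ 0 are take/drop
def pvMsort {α κ : Type} [LinearOrder κ] (key : α → κ) (items : List α) : List α :=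
  if items.length ≤ 1 then items
  else
    pvMergeLoop key (pvMsort key (items.take (items.length / 2)))
      (pvMsort key (items.drop (items.length / 2))) 0 0 []
termination_by items.length
decreasing_by
  · simp only [List.length_take]; omega
  · simp only [List.length_drop]; omega

-- Source B's sort_category
def pvSortCat (cd : List (String × String)) : List (String × String) :=
  let prompts := PySem.Dict.ofList
    (pvMsort (fun kv => PySem.Str.lower kv.1) (cd.filter (fun kv => kv.1 != "__meta__")))
  let metaV := PySem.Dict.get? (PySem.Dict.mk cd) "__meta__"
  let prompts' :=
    match metaV with
    | some m => prompts.insert "__meta__" m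
    | none => prompts
  prompts'.items

def sort_prompts_data_alt (data : List (String × List (String × String))) : List (String × List (String × String)) :=
  (PySem.Dict.ofList
    ((pvMsort (fun k => PySem.Str.lower k) ((PySem.Dict.mk data).keys)).map
      (fun category => (category, pvSortCat ((PySem.Dict.mk data).getD category []))))).items

-- ===== PRECONDITION & SPEC =====
def Spec_sort_prompts_data (data : List (String × List (String × String))) (out : List (String × List (String × String))) : Prop := out = sort_prompts_data_alt data
instance (data : List (String × List (String × String))) (out : List (String × List (String × String))) : Decidable (Spec_sort_prompts_data data out) := by unfold Spec_sort_prompts_data; infer_instance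

-- ===== CLAIM (what is proved, stated in full; the proofs are below) =====
def Claim_equal_sort_prompts_data : Prop := ∀ (data : List (String × List (String × String))), Dom_sort_prompts_data data → Spec_sort_prompts_data data (sort_prompts_data data)

-- ===== LEMMAS AND PROOFS =====

-- clean cons-recursive stable merge (proof-only restatement of the merge loop)
def pvMerge {α κ : Type} [LinearOrder κ] (key : α → κ) : List α → List α → List α
  | [], ys => ys
  | x :: xs, [] => x :: xs
  | x :: xs, y :: ys =>
    if key x ≤ key y then x :: pvMerge key xs (y :: ys) else y :: pvMerge key (x :: xs) ys

theorem pvMerge_nil_left {α κ : Type} [LinearOrder κ] (key : α → κ) (R : List α) :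
    pvMerge key [] R = R := by simp [pvMerge]

theorem pvMerge_nil_right {α κ : Type} [LinearOrder κ] (key : α → κ) (L : List α) :
    pvMerge key L [] = L := by cases L <;> simp [pvMerge]

theorem pvMerge_cons_cons {α κ : Type} [LinearOrder κ] (key : α → κ) (x y : α) (xs ys : List α) :
    pvMerge key (x :: xs) (y :: ys)
      = if key x ≤ key y then x :: pvMerge key xs (y :: ys) else y :: pvMerge key (x :: xs) ys := by
  simp [pvMerge]

theorem pv_insertBy_nil {α : Type} (bf : α → α → Bool) (x : α) :
    PySem.List.insertBy bf x [] = [x] := rfl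

theorem pv_insertBy_cons {α : Type} (bf : α → α → Bool) (x a : α) (t : List α) :
    PySem.List.insertBy bf x (a :: t)
      = if bf x a then x :: a :: t else a :: PySem.List.insertBy bf x t := rfl

theorem pvMergeLoop_eq {α κ : Type} [LinearOrder κ] (key : α → κ)
    (L R : List α) (i j : Nat) (out : List α) :
    pvMergeLoop key L R i j out = out ++ pvMerge key (L.drop i) (R.drop j) := by
  fun_induction pvMergeLoop key L R i j out with
  | case1 i j out h hle ih =>
    rw [ih, List.drop_eq_getElem_cons h.1, List.drop_eq_getElem_cons h.2, pvMerge_cons_cons,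
      if_pos hle, ← List.drop_eq_getElem_cons h.2]
    simp
  | case2 i j out h hle ih =>
    rw [ih, List.drop_eq_getElem_cons h.1, List.drop_eq_getElem_cons h.2, pvMerge_cons_cons,
      if_neg hle, ← List.drop_eq_getElem_cons h.1]
    simp
  | case3 i j out h =>
    rcases Nat.lt_or_ge i L.length with hi | hi
    · have hj : R.length ≤ j := by omega
      rw [List.drop_eq_nil_of_le hj, pvMerge_nil_right, List.append_nil]
    · rw [List.drop_eq_nil_of_le hi, pvMerge_nil_left, List.append_nil]

-- inserting y (after its equals) into the right argument commutes with the stable merge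
theorem pvMerge_insertBy {α κ : Type} [LinearOrder κ] (key : α → κ) (y : α) (L M : List α) :
    pvMerge key L (PySem.List.insertBy (fun a b => decide (key a < key b)) y M)
      = PySem.List.insertBy (fun a b => decide (key a < key b)) y (pvMerge key L M) := by
  induction L generalizing M with
  | nil => rw [pvMerge_nil_left, pvMerge_nil_left]
  | cons x L' ihL =>
    induction M with
    | nil =>
      rw [pv_insertBy_nil, pvMerge_nil_right, pvMerge_cons_cons, pv_insertBy_cons]
      by_cases hxy : key x ≤ key y
      · rw [if_pos hxy, if_neg (by simp [not_lt.mpr hxy])]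
        have h := ihL []
        rw [pv_insertBy_nil, pvMerge_nil_right] at h
        rw [h]
      · rw [if_neg hxy, if_pos (by simp [lt_of_not_ge hxy]), pvMerge_nil_right]
    | cons m M' ihM =>
      rw [pv_insertBy_cons, pvMerge_cons_cons (ys := M')]
      by_cases hym : key y < key m
      · rw [if_pos (by simp [hym]), pvMerge_cons_cons]
        by_cases hxy : key x ≤ key y
        · have hxm : key x ≤ key m := le_of_lt (lt_of_le_of_lt hxy hym)
          rw [if_pos hxy, if_pos hxm, pv_insertBy_cons, if_neg (by simp [not_lt.mpr hxy])]
          have h := ihL (m :: M')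
          rw [pv_insertBy_cons, if_pos (by simp [hym])] at h
          rw [h]
        · rw [if_neg hxy]
          by_cases hxm : key x ≤ key m
          · rw [if_pos hxm, pv_insertBy_cons, if_pos (by simp [lt_of_not_ge hxy]),
              pvMerge_cons_cons, if_pos hxm]
          · rw [if_neg hxm, pv_insertBy_cons, if_pos (by simp [hym]),
              pvMerge_cons_cons, if_neg hxm]
      · rw [if_neg (by simp [hym]), pvMerge_cons_cons]
        by_cases hxm : key x ≤ key m
        · have hxy : key x ≤ key y := le_trans hxm (not_lt.mp hym)
          rw [if_pos hxm, if_pos hxm, pv_insertBy_cons, if_neg (by simp [not_lt.mpr hxy])]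
          have h := ihL (m :: M')
          rw [pv_insertBy_cons, if_neg (by simp [hym])] at h
          rw [h]
        · rw [if_neg hxm, if_neg hxm, pv_insertBy_cons, if_neg (by simp [hym]), ihM]

theorem pv_sorted_append_singleton {α κ : Type} [LinearOrder κ] (key : α → κ)
    (xs : List α) (x : α) :
    PySem.List.sorted (xs ++ [x]) key false
      = PySem.List.insertBy (fun a b => decide (key a < key b)) x
          (PySem.List.sorted xs key false) := by
  rw [PySem.List.sorted_eq_foldl_insertBy, PySem.List.sorted_eq_foldl_insertBy,
    List.foldl_append, List.foldl_cons, List.foldl_nil]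

-- the stable merge of two stable sorts is the stable sort of the concatenation
theorem pvMerge_sorted {α κ : Type} [LinearOrder κ] (key : α → κ) (A B : List α) :
    pvMerge key (PySem.List.sorted A key false) (PySem.List.sorted B key false)
      = PySem.List.sorted (A ++ B) key false := by
  induction B using List.reverseRecOn with
  | nil =>
    rw [show PySem.List.sorted ([] : List α) key false = [] from rfl, pvMerge_nil_right,
      List.append_nil]
  | append_singleton B y ih =>
    rw [pv_sorted_append_singleton, pvMerge_insertBy, ih, ← List.append_assoc,
      ← pv_sorted_append_singleton]

-- Source B's merge sort computes exactly Python's stable sorted(xs, key=key)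
theorem pvMsort_eq_sorted {α κ : Type} [LinearOrder κ] (key : α → κ) (l : List α) :
    pvMsort key l = PySem.List.sorted l key false := by
  fun_induction pvMsort key l with
  | case1 l h =>
    match l, h with
    | [], _ => rfl
    | [x], _ => rfl
  | case2 l h ih1 ih2 =>
    rw [pvMergeLoop_eq, List.drop_zero, List.drop_zero, List.nil_append, ih1, ih2,
      pvMerge_sorted, List.take_append_drop]

-- ===== VERDICT (by name: the statement is the Claim_ definition above) =====
theorem sort_prompts_data_spec : Claim_equal_sort_prompts_data := by
  intro data _hdom
  unfold Spec_sort_prompts_data sort_prompts_data sort_prompts_data_alt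
  rw [pvMsort_eq_sorted, PySem.Dict.ofList, PySem.Dict.update, List.foldl_map]
  congr 1
  apply PySem.List.foldl_congr_mem
  intro acc category _hc
  simp only
  congr 1
  simp only [pvSortCat, pvMsort_eq_sorted]
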